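-- pv_equiv track=rewrite | github.com/liucheng2912/py | leecode/easy/208/1370.py | f
-- ===== SOURCE A (Python) =====
-- def f(s):
--     d={}
--     s1=''
--     for i in s:
--         if i not in d:
--             d[i]=1
--         else:
--             d[i]+=1
--     s=list(set(s))
--     s.sort()
--     while len(d)>0:
--         for i in s:
--             if i in d:
--                 s1+=i
--                 d[i]-=1
--                 if d[i]==0:
--                     d.pop(i)
--         for i in range(len(s)-1,-1,-1):
--             if s[i] in d:
--                 s1+=s[i]
--                 d[s[i]]-=1
--                 if d[s[i]]==0:
--                     d.pop(s[i])
--     return s1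
-- ===== SOURCE B (Python) =====
-- def f(s):
--     counts = {}
--     for c in s:
--         counts[c] = counts.get(c, 0) + 1
--     alive = sorted(counts)   # alphabetical list of still-active characters
--     out = []
--     t = 0                    # number of passes already emitted
--     while alive:
--         a = ''.join(alive)
--         d = a[::-1]
--         k = min(counts[c] for c in alive)   # alive set is unchanged for passes t .. k-1
--         reps = k - t
--         pat = (a + d) if t % 2 == 0 else (d + a)
--         out.append(pat * (reps // 2))
--         if reps % 2:
--             out.append(a if t % 2 == 0 else d)
--         t = k
--         alive = [c for c in alive if counts[c] > t]
--     return ''.join(out)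
-- ===== Notes on version B (the rewrite author's own statement) =====
-- stated objective: faster
-- what changed: A rescans every distinct character and mutates a dict per pass; B observes that the active set only changes when a count value is exhausted, so it run-length-compresses: per distinct count value it emits the whole block of identical ascending/descending passes at once via joins and string repetition.
import Mathlib
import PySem

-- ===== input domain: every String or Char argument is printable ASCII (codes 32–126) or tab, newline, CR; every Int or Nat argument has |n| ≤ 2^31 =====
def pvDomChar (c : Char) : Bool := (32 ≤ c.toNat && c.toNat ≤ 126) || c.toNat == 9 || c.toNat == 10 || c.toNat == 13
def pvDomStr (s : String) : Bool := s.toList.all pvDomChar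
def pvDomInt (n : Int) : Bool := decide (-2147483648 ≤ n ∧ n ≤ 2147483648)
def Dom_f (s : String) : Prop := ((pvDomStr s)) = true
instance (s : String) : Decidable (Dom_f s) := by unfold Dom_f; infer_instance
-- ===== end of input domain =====

-- B replaces A's per-pass rescan-and-decrement of every distinct character by run-length
-- compression: between two consecutive distinct count values the set of active characters is
-- unchanged, so B emits the whole block of identical passes at once: objective 'faster'.

-- ===== PORT A =====
-- the first loop of A: 'for i in s: if i not in d: d[i]=1 else: d[i]+=1'
def fCount (l : List Char) : PySem.Dict Char Int :=
  l.foldl (fun d i => if !(d.contains i) then d.insert i 1 else d.insert i (d.getD i 0 + 1))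
    PySem.Dict.empty

-- one 'for i in <ord>' pass of A's while-body (both inner loops have exactly this body);
-- 'd[i] -= 1' is insert i (d[i]-1); 'd.pop(i)' discards the returned value, so it is 'erase'
def fPass (ord : List Char) (st : PySem.Dict Char Int × List Char) :
    PySem.Dict Char Int × List Char :=
  ord.foldl (fun st i =>
    if st.1.contains i then
      let d1 := st.1.insert i (st.1.getD i 0 - 1)
      let d2 := if d1.getD i 0 = 0 then d1.erase i else d1
      (d2, st.2 ++ [i])
    else st) st

-- A's 'while len(d)>0' loop; fuel: each round strictly decreases the maximal count, which is
-- at most len(s), so len(s)+1 rounds always suffice (the loop exits as soon as d is empty)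
def fLoop (sl : List Char) : Nat → PySem.Dict Char Int × List Char → List Char
  | 0, st => st.2
  | fuel+1, st =>
    if 0 < st.1.size then
      let st1 := fPass sl st
      -- 'for i in range(len(s)-1,-1,-1): … s[i] …'
      let st2 := (PySem.List.pyRange ((sl.length : Int) - 1) (-1) (-1)).foldl (fun st i =>
        let c := PySem.List.pyGetD sl i ' '
        if st.1.contains c then
          let d1 := st.1.insert c (st.1.getD c 0 - 1)
          let d2 := if d1.getD c 0 = 0 then d1.erase c else d1
          (d2, st.2 ++ [c])
        else st) st1
      fLoop sl fuel st2
    else st.2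

def f (s : String) : String :=
  let d := fCount s.toList
  -- s = list(set(s)); s.sort()  — the sorted distinct characters
  let sl := PySem.List.sorted (PySem.Set.ofList s.toList) (fun x => x) false
  String.mk (fLoop sl (s.toList.length + 1) (d, []))

-- ===== PORT B =====
-- B's 'while alive' loop; fuel: every iteration removes at least the character attaining the
-- minimal count, so len(s)+1 iterations always suffice (the loop exits when alive is empty)
def fAlt3Loop (counts : PySem.Dict Char Int) : Nat → List Char → Int → List Char → List Char
  | 0, _, _, out => out
  | fuel+1, alive, t, out =>
    if alive.isEmpty then out
    else
      let a := alive                                -- a = ''.join(alive)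
      let dd := a.reverse                           -- d = a[::-1]  (reversal)
      -- k = min(counts[c] for c in alive); alive ≠ [] here, so min? is some (getD unreachable)
      let k := (PySem.List.min? (alive.map (fun c => counts.getD c 0)) (fun x => x)).getD 0
      let reps := k - t
      let pat := if PySem.Int.mod t 2 = 0 then a ++ dd else dd ++ a
      -- out.append(pat * (reps // 2))
      let out1 := out ++ (List.replicate (PySem.Int.floordiv reps 2).toNat pat).flatten
      -- if reps % 2: out.append(a if t % 2 == 0 else d)
      let out2 := if PySem.Int.mod reps 2 ≠ 0 then out1 ++ (if PySem.Int.mod t 2 = 0 then a else dd) else out1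
      fAlt3Loop counts fuel (alive.filter (fun c => decide (k < counts.getD c 0))) k out2

def f_alt (s : String) : String :=
  -- counts[c] = counts.get(c, 0) + 1
  let counts := s.toList.foldl (fun d c => d.insert c (d.getD c 0 + 1)) PySem.Dict.empty
  -- alive = sorted(counts)
  let alive := PySem.List.sorted counts.keys (fun x => x) false
  String.mk (fAlt3Loop counts (s.toList.length + 1) alive 0 [])

-- ===== PRECONDITION & SPEC =====
def Spec_f (s : String) (out : String) : Prop := out = f_alt s
instance (s : String) (out : String) : Decidable (Spec_f s out) := by unfold Spec_f; infer_instance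

-- ===== CLAIM (what is proved, stated in full; the proofs are below) =====
def Claim_equal_f : Prop := ∀ (s : String), Dom_f s → Spec_f s (f s)

-- ===== LEMMAS AND PROOFS =====

-- the active list B maintains, read off A's dict: the sl-entries still present in d, in sl's order
def rep (d : PySem.Dict Char Int) (sl : List Char) : List (Char × Int) :=
  sl.filterMap (fun c => (d.get? c).map (fun k => (c, k)))

-- what one A-pass does to one stored count
def dec1 (o : Option Int) : Option Int :=
  o.bind (fun k => if k - 1 = 0 then none else some (k - 1))

theorem get?_erase (d : PySem.Dict Char Int) (k c : Char) :
    (d.erase k).get? c = if c = k then none else d.get? c := by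
  simp only [PySem.Dict.erase, PySem.Dict.get?, List.find?_filter]
  by_cases hck : c = k
  · subst hck
    rw [if_pos rfl, List.find?_eq_none.mpr ?_]
    · rfl
    · intro a _; simp
  · rw [if_neg hck]
    have : (fun (a : Char × Int) => decide ((!a.1 == k) = true ∧ (a.1 == c) = true))
        = (fun (a : Char × Int) => a.1 == c) := by
      funext a
      by_cases h : a.1 = c <;> simp [h, hck]
    rw [this]

theorem get?_of_contains (d : PySem.Dict Char Int) (c : Char) (h : d.contains c = true) :
    d.get? c = some (d.getD c 0) := by
  rw [PySem.Dict.contains_eq_isSome_get?] at h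
  obtain ⟨v, hv⟩ := Option.isSome_iff_exists.mp h
  rw [hv, PySem.Dict.getD_eq_get?_getD, hv]; rfl

theorem get?_of_not_contains (d : PySem.Dict Char Int) (c : Char) (h : d.contains c = false) :
    d.get? c = none := by
  rw [PySem.Dict.contains_eq_isSome_get?] at h
  exact Option.not_isSome_iff_eq_none.mp (by simp [h])

-- one A-pass over ord: it emits exactly the ord-order active characters and applies dec1 to each count
theorem fPass_spec (ord : List Char) (hnd : ord.Nodup) (d : PySem.Dict Char Int)
    (out : List Char) :
    (fPass ord (d, out)).2 = out ++ (rep d ord).map Prod.fst ∧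
    ∀ c, (fPass ord (d, out)).1.get? c = if c ∈ ord then dec1 (d.get? c) else d.get? c := by
  induction ord generalizing d out with
  | nil => simp [fPass, rep]
  | cons i t ih =>
    obtain ⟨hit, hndt⟩ := List.nodup_cons.mp hnd
    by_cases hc : d.contains i = true
    · have hki := get?_of_contains d i hc
      set k := d.getD i 0 with hkdef
      have hstep : fPass (i :: t) (d, out)
          = fPass t (if k - 1 = 0 then (d.insert i (k - 1)).erase i else d.insert i (k - 1),
                     out ++ [i]) := by
        simp only [fPass, List.foldl_cons, hc, if_pos]
        rw [PySem.Dict.getD_insert_self]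
      have hd2 : ∀ c, (if k - 1 = 0 then (d.insert i (k - 1)).erase i
          else d.insert i (k - 1)).get? c = if c = i then dec1 (d.get? c) else d.get? c := by
        intro c
        by_cases hz : k - 1 = 0
        · rw [if_pos hz, get?_erase]
          by_cases hci : c = i
          · simp [hci, hki, dec1, hz]
          · simp [PySem.Dict.get?_insert, hci]
        · rw [if_neg hz, PySem.Dict.get?_insert]
          by_cases hci : c = i
          · simp [hci, hki, dec1, hz]
          · simp [hci]
      set d2 := (if k - 1 = 0 then (d.insert i (k - 1)).erase i else d.insert i (k - 1)) with hd2def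
      have hrept : rep d2 t = rep d t := by
        apply List.filterMap_congr
        intro c hct
        rw [hd2 c, if_neg (fun h : c = i => hit (h ▸ hct))]
      obtain ⟨hout, hget⟩ := ih hndt d2 (out ++ [i])
      rw [hstep]
      constructor
      · rw [hout, hrept]
        have : rep d (i :: t) = (i, k) :: rep d t := by
          simp [rep, hki]
        rw [this]; simp
      · intro c
        rw [hget c]
        by_cases hci : c = i
        · subst hci
          rw [if_neg hit, hd2 c, if_pos rfl, if_pos (List.mem_cons_self)]
        · rw [hd2 c, if_neg hci]
          by_cases hct : c ∈ t
          · simp [hct, hci]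
          · simp [hct, hci]
    · have hc' : d.contains i = false := by simpa using hc
      have hki := get?_of_not_contains d i hc'
      have hstep : fPass (i :: t) (d, out) = fPass t (d, out) := by
        simp [fPass, List.foldl_cons, hc]
      obtain ⟨hout, hget⟩ := ih hndt d out
      rw [hstep]
      constructor
      · rw [hout]
        have : rep d (i :: t) = rep d t := by simp [rep, hki]
        rw [this]
      · intro c
        rw [hget c]
        by_cases hci : c = i
        · subst hci
          rw [if_neg hit, if_pos (List.mem_cons_self), hki]; rfl
        · by_cases hct : c ∈ t <;> simp [hct, hci]

-- A's index loop 'for i in range(len(s)-1,-1,-1)' visits exactly sl reversed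
theorem revRange_map (sl : List Char) :
    (PySem.List.pyRange ((sl.length : Int) - 1) (-1) (-1)).map
      (fun i => PySem.List.pyGetD sl i ' ') = sl.reverse := by
  have hrange : PySem.List.pyRange ((sl.length : Int) - 1) (-1) (-1)
      = (List.range sl.length).map (fun k : Nat => (sl.length : Int) - 1 - (k : Int)) := by
    rw [PySem.List.pyRange]
    rcases Nat.eq_zero_or_pos sl.length with h | h
    · simp [h]
    · have h1 : ¬((-1 : Int) = 0) := by norm_num
      have h2 : ¬(0 < (-1 : Int)) := by norm_num
      have h3 : (-1 : Int) < (sl.length : Int) - 1 := by omega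
      simp only [if_neg h1, if_pos h3, h2, if_false]
      have he : ((sl.length : Int) - 1 - -1 + - -1 - 1) / - -1 = (sl.length : Int) := by
        norm_num
      rw [he]
      simp only [Int.toNat_natCast]
      apply List.map_congr_left
      intro k _
      ring
  rw [hrange, List.map_map]
  apply List.ext_getElem
  · simp
  · intro j h1 h2
    simp only [List.getElem_map, List.getElem_range, Function.comp_apply, List.getElem_reverse]
    have hj : j < sl.length := by simpa using h1
    have hcast : (sl.length : Int) - 1 - ((j : Nat) : Int) = ((sl.length - 1 - j : Nat) : Int) := by
      omega
    rw [hcast, PySem.List.pyGetD_natCast]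
    rw [List.getD_eq_getElem sl ' ' (by omega)]

-- the second inner loop of A is the first one run over sl.reverse
theorem revPass_eq (sl : List Char) (st : PySem.Dict Char Int × List Char) :
    (PySem.List.pyRange ((sl.length : Int) - 1) (-1) (-1)).foldl (fun st i =>
      let c := PySem.List.pyGetD sl i ' '
      if st.1.contains c then
        let d1 := st.1.insert c (st.1.getD c 0 - 1)
        let d2 := if d1.getD c 0 = 0 then d1.erase c else d1
        (d2, st.2 ++ [c])
      else st) st = fPass sl.reverse st := by
  rw [fPass, ← revRange_map sl, List.foldl_map]

-- A's loop guard len(d) > 0, read through rep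
theorem size_zero_iff (d : PySem.Dict Char Int) (sl : List Char)
    (hsub : ∀ c, c ∉ sl → d.get? c = none) : d.size = 0 ↔ rep d sl = [] := by
  constructor
  · intro h
    have hnil : d.items = [] := List.length_eq_zero_iff.mp h
    simp only [rep, List.filterMap_eq_nil_iff]
    intro c _
    simp [PySem.Dict.get?, hnil]
  · intro h
    by_contra hne
    obtain ⟨p, t, hpt⟩ : ∃ p t, d.items = p :: t := by
      cases hd : d.items with
      | nil => exact absurd (by simp [PySem.Dict.size, hd]) hne
      | cons p t => exact ⟨p, t, rfl⟩
    have hp : d.get? p.1 = some p.2 := by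
      simp [PySem.Dict.get?, hpt]
    by_cases hmem : p.1 ∈ sl
    · have := List.filterMap_eq_nil_iff.mp h p.1 hmem
      simp [hp] at this
    · rw [hsub p.1 hmem] at hp; simp at hp

theorem fLoop_of_empty (sl : List Char) (n : Nat) (d : PySem.Dict Char Int) (out : List Char)
    (h : d.size = 0) : fLoop sl n (d, out) = out := by
  cases n with
  | zero => rfl
  | succ m => simp [fLoop, h]

theorem filterMap_ite (sl : List Char) (p : Char → Bool) (g : Char → Char × Int) :
    sl.filterMap (fun c => if p c then some (g c) else none) = (sl.filter p).map g := by
  induction sl with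
  | nil => rfl
  | cons c t ih =>
    by_cases h : p c <;> simp [h, ih]

theorem filter_length_lt (l : List Char) (p : Char → Bool) (x : Char) (hx : x ∈ l)
    (hpx : p x = false) : (l.filter p).length < l.length := by
  induction l with
  | nil => cases hx
  | cons a t ih =>
    rcases List.mem_cons.mp hx with rfl | hxt
    · rw [List.filter_cons, if_neg (by simp [hpx])]
      exact Nat.lt_succ_of_le (List.length_filter_le p t)
    · rw [List.filter_cons]
      by_cases hpa : p a
      · simpa [hpa] using Nat.succ_lt_succ (ih hxt)
      · simp only [hpa]
        exact Nat.lt_succ_of_lt (ih hxt)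

-- the common description both loops are proved equal to: one emission per threshold t,
-- alphabetical when t is even, reversed when odd, stopping when nothing is active
def dirOf (al : List Char) (t : Int) : List Char := if t % 2 = 0 then al else al.reverse

def specPasses (cnt : Char → Int) (sl : List Char) : Nat → Int → List Char
  | 0, _ => []
  | fuel+1, t =>
    let al := sl.filter (fun c => decide (t < cnt c))
    if al.isEmpty then [] else dirOf al t ++ specPasses cnt sl fuel (t+1)

def specEmit (al : List Char) : Nat → Int → List Char
  | 0, _ => []
  | r+1, t => dirOf al t ++ specEmit al r (t+1)

-- ===== A SIDE: fLoop meets specPasses =====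
theorem A_loop_spec (cnt : Char → Int) (sl : List Char) (hnd : sl.Nodup) :
    ∀ (fuel : Nat) (d : PySem.Dict Char Int) (t : Int) (out : List Char),
      t % 2 = 0 →
      (∀ c, d.get? c = if c ∈ sl ∧ t < cnt c then some (cnt c - t) else none) →
      fLoop sl fuel (d, out) = out ++ specPasses cnt sl (2 * fuel) t := by
  intro fuel
  induction fuel with
  | zero =>
    intro d t out _ _
    simp only [Nat.mul_zero]
    simp [fLoop, specPasses]
  | succ n ih =>
    intro d t out ht hinv
    have hsub : ∀ c, c ∉ sl → d.get? c = none := by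
      intro c hc; rw [hinv c, if_neg (by tauto)]
    have hrep : rep d sl
        = (sl.filter (fun c => decide (t < cnt c))).map (fun c => (c, cnt c - t)) := by
      rw [rep, List.filterMap_congr (g := fun c =>
          if decide (t < cnt c) then some (c, cnt c - t) else none) ?_, filterMap_ite]
      intro c hc
      rw [hinv c]
      by_cases h : t < cnt c <;> simp [h, hc]
    set al := sl.filter (fun c => decide (t < cnt c)) with hal
    have h2n : 2 * (n + 1) = (2 * n + 1) + 1 := by omega
    by_cases hsz : d.size = 0
    · have h0 : rep d sl = [] := (size_zero_iff d sl hsub).mp hsz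
      have hale : al.isEmpty := by
        rw [hrep] at h0
        simpa [List.isEmpty_iff] using List.map_eq_nil_iff.mp h0
      rw [h2n]
      simp [fLoop, hsz, specPasses, ← hal, hale]
    · have hale : ¬ al.isEmpty := by
        intro h
        apply hsz
        rw [size_zero_iff d sl hsub, hrep, List.isEmpty_iff.mp h]
        rfl
      have hszpos : 0 < d.size := Nat.pos_of_ne_zero hsz
      obtain ⟨hout1, hget1⟩ := fPass_spec sl hnd d out
      have hinv1 : ∀ c, (fPass sl (d, out)).1.get? c
          = if c ∈ sl ∧ t + 1 < cnt c then some (cnt c - (t + 1)) else none := by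
        intro c
        rw [hget1 c]
        by_cases hc : c ∈ sl
        · rw [if_pos hc, hinv c]
          by_cases h1 : t < cnt c
          · by_cases h2 : t + 1 < cnt c
            · have : ¬(cnt c - t - 1 = 0) := by omega
              simp [hc, h1, h2, dec1, this]
              omega
            · have : cnt c - t - 1 = 0 := by omega
              simp [hc, h1, h2, dec1, this]
          · have h2 : ¬(t + 1 < cnt c) := by omega
            simp [hc, h1, h2, dec1]
        · rw [if_neg hc, hinv c]
          simp [hc]
      have hemit1 : (rep d sl).map Prod.fst = al := by
        rw [hrep, List.map_map]
        simp [Function.comp_def]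
      obtain ⟨hout2, hget2⟩ := fPass_spec sl.reverse (List.nodup_reverse.mpr hnd)
        (fPass sl (d, out)).1 (fPass sl (d, out)).2
      have hinv2 : ∀ c, (fPass sl.reverse ((fPass sl (d, out)).1, (fPass sl (d, out)).2)).1.get? c
          = if c ∈ sl ∧ t + 2 < cnt c then some (cnt c - (t + 2)) else none := by
        intro c
        rw [hget2 c]
        by_cases hc : c ∈ sl
        · rw [if_pos (List.mem_reverse.mpr hc), hinv1 c]
          by_cases h1 : t + 1 < cnt c
          · by_cases h2 : t + 2 < cnt c
            · have : ¬(cnt c - (t + 1) - 1 = 0) := by omega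
              simp [hc, h1, h2, dec1, this]
              omega
            · have : cnt c - (t + 1) - 1 = 0 := by omega
              simp [hc, h1, h2, dec1, this]
          · have h2 : ¬(t + 2 < cnt c) := by omega
            simp [hc, h1, h2, dec1]
        · rw [if_neg (by simpa using hc), hinv1 c]
          simp [hc]
      have hrep1 : rep (fPass sl (d, out)).1 sl
          = (sl.filter (fun c => decide (t + 1 < cnt c))).map (fun c => (c, cnt c - (t + 1))) := by
        rw [rep, List.filterMap_congr (g := fun c =>
            if decide (t + 1 < cnt c) then some (c, cnt c - (t + 1)) else none) ?_, filterMap_ite]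
        intro c hc
        rw [hinv1 c]
        by_cases h : t + 1 < cnt c <;> simp [h, hc]
      set al1 := sl.filter (fun c => decide (t + 1 < cnt c)) with hal1
      have hemit2 : (rep (fPass sl (d, out)).1 sl.reverse).map Prod.fst = al1.reverse := by
        rw [rep, List.filterMap_reverse, ← rep, hrep1, List.map_reverse, List.map_map]
        simp [Function.comp_def]
      have hsub1 : ∀ c, c ∉ sl → (fPass sl (d, out)).1.get? c = none := by
        intro c hc; rw [hinv1 c, if_neg (by tauto)]
      have hA : fLoop sl (n + 1) (d, out)
          = fLoop sl n (fPass sl.reverse ((fPass sl (d, out)).1, (fPass sl (d, out)).2)) := by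
        simp only [fLoop, if_pos hszpos, revPass_eq]
      have houts : (fPass sl.reverse ((fPass sl (d, out)).1, (fPass sl (d, out)).2)).2
          = out ++ al ++ al1.reverse := by
        rw [hout2, hemit2, hout1, hemit1]
      have hspec : specPasses cnt sl (2 * (n + 1)) t
          = al ++ specPasses cnt sl (2 * n + 1) (t + 1) := by
        rw [h2n]
        simp only [specPasses, ← hal]
        rw [if_neg hale, dirOf, if_pos ht]
      by_cases hal1e : al1.isEmpty
      · have hsz2 : (fPass sl.reverse ((fPass sl (d, out)).1, (fPass sl (d, out)).2)).1.size = 0 := by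
          rw [size_zero_iff _ sl (fun c hc => by rw [hinv2 c, if_neg (by tauto)])]
          rw [rep, List.filterMap_eq_nil_iff]
          intro c hc
          rw [hinv2 c]
          have hnal1 : c ∉ al1 := by rw [List.isEmpty_iff.mp hal1e]; simp
          rw [hal1] at hnal1
          simp only [List.mem_filter, hc, true_and] at hnal1
          have h2 : ¬(t + 2 < cnt c) := by
            intro h; exact hnal1 (by simp; omega)
          simp [h2]
        rw [hA, fLoop_of_empty _ _ _ _ hsz2, houts, hspec]
        have hz : specPasses cnt sl (2 * n + 1) (t + 1) = [] := by
          simp only [specPasses, ← hal1]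
          rw [if_pos hal1e]
        rw [hz]
        simp [List.isEmpty_iff.mp hal1e]
      · have hrec := ih (fPass sl.reverse ((fPass sl (d, out)).1, (fPass sl (d, out)).2)).1
          (t + 2) (out ++ al ++ al1.reverse) (by omega) hinv2
        rw [hA, show (fPass sl.reverse ((fPass sl (d, out)).1, (fPass sl (d, out)).2))
            = ((fPass sl.reverse ((fPass sl (d, out)).1, (fPass sl (d, out)).2)).1,
               (fPass sl.reverse ((fPass sl (d, out)).1, (fPass sl (d, out)).2)).2) from rfl,
          houts, hrec, hspec]
        have hspec1 : specPasses cnt sl (2 * n + 1) (t + 1)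
            = al1.reverse ++ specPasses cnt sl (2 * n) (t + 1 + 1) := by
          simp only [specPasses, ← hal1]
          rw [if_neg hal1e, dirOf, if_neg (by omega)]
        rw [hspec1, show t + 1 + 1 = t + 2 from by ring]
        simp [List.append_assoc]

-- ===== B SIDE: fAlt3Loop meets specPasses =====
-- while the active set does not change, specPasses just alternates over the same list
theorem spec_run (cnt : Char → Int) (sl : List Char) (al : List Char) (hne : ¬ al.isEmpty) :
    ∀ (r : Nat) (t : Int) (F : Nat), r ≤ F →
      al = sl.filter (fun c => decide (t < cnt c)) →
      (∀ c ∈ al, t + r ≤ cnt c) →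
      specPasses cnt sl F t = specEmit al r t ++ specPasses cnt sl (F - r) (t + r) := by
  intro r
  induction r with
  | zero =>
    intro t F _ _ _
    simp [specEmit]
  | succ r ihr =>
    intro t F hrF hal hstable
    obtain ⟨F', rfl⟩ : ∃ F', F = F' + 1 := ⟨F - 1, by omega⟩
    have hunf : specPasses cnt sl (F' + 1) t = dirOf al t ++ specPasses cnt sl F' (t + 1) := by
      simp only [specPasses, ← hal]
      rw [if_neg hne]
    cases r with
    | zero =>
      rw [hunf]
      simp [specEmit, dirOf]
    | succ r' =>
      have hal' : al = sl.filter (fun c => decide (t + 1 < cnt c)) := by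
        rw [hal]
        apply List.filter_congr
        intro c hc
        by_cases h1 : t < cnt c
        · have hcal : c ∈ al := by rw [hal]; exact List.mem_filter.mpr ⟨hc, by simpa⟩
          have := hstable c hcal
          have h2 : t + 1 < cnt c := by push_cast at this ⊢; omega
          simp [h1, h2]
        · have h2 : ¬(t + 1 < cnt c) := by omega
          simp [h1, h2]
      have hstable' : ∀ c ∈ al, (t + 1) + (r' + 1 : Nat) ≤ cnt c := by
        intro c hc
        have := hstable c hc
        push_cast at this ⊢
        omega
      have := ihr (t + 1) F' (by omega) hal' hstable'
      rw [hunf, this, specEmit]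
      have h1 : t + ((r' + 1 : Nat) + 1 : Nat) = (t + 1) + ((r' + 1 : Nat) : Int) := by
        push_cast; ring
      have h2 : F' + 1 - (r' + 1 + 1) = F' - (r' + 1) := by omega
      rw [h1, h2]
      simp only [specEmit, List.append_assoc]

-- B's pattern-times-reps emission is exactly r alternating passes over the unchanged set
theorem emit_closed (al : List Char) :
    ∀ (r : Nat) (t : Int),
      (List.replicate (r / 2) (if t % 2 = 0 then al ++ al.reverse else al.reverse ++ al)).flatten
        ++ (if r % 2 ≠ 0 then (if t % 2 = 0 then al else al.reverse) else [])
      = specEmit al r t := by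
  intro r
  induction r using Nat.twoStepInduction with
  | zero => intro t; simp [specEmit]
  | one => intro t; simp [specEmit, dirOf]
  | more r ih _ =>
    intro t
    have hdiv : (r + 2) / 2 = r / 2 + 1 := by omega
    have hmod : (r + 2) % 2 = r % 2 := by omega
    have hpar : (t + 2) % 2 = t % 2 := by omega
    have hpat : (if (t + 2) % 2 = 0 then al ++ al.reverse else al.reverse ++ al)
        = (if t % 2 = 0 then al ++ al.reverse else al.reverse ++ al) := by rw [hpar]
    have hih := ih (t + 2)
    rw [hpat] at hih
    have hspec : specEmit al (r + 2) t
        = dirOf al t ++ (dirOf al (t + 1) ++ specEmit al r (t + 1 + 1)) := by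
      rfl
    rw [hspec, show t + 1 + 1 = t + 2 from by ring, ← hih, hdiv, hmod,
      List.replicate_succ, List.flatten_cons]
    by_cases hp : t % 2 = 0
    · have hp1 : ¬((t + 1) % 2 = 0) := by omega
      simp [dirOf, hp, hp1, List.append_assoc]
    · have hp1 : (t + 1) % 2 = 0 := by omega
      simp [dirOf, hp, hp1, List.append_assoc]

theorem B_loop_spec (counts : PySem.Dict Char Int) (sl : List Char) :
    ∀ (fuel : Nat) (alive : List Char) (t : Int) (out : List Char) (F : Nat),
      alive = sl.filter (fun c => decide (t < counts.getD c 0)) →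
      alive.length < fuel →
      (∀ c ∈ sl, counts.getD c 0 - t ≤ F) →
      fAlt3Loop counts fuel alive t out
        = out ++ specPasses (fun c => counts.getD c 0) sl F t := by
  intro fuel
  induction fuel with
  | zero => intro alive t out F _ h _; omega
  | succ n ih =>
    intro alive t out F hal hlen hF
    by_cases hae : alive.isEmpty
    · have hae' : alive = [] := List.isEmpty_iff.mp hae
      have hflt : sl.filter (fun c => decide (t < counts.getD c 0)) = [] := by rw [← hal, hae']
      have hz : specPasses (fun c => counts.getD c 0) sl F t = [] := by
        cases F with
        | zero => rfl
        | succ F' =>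
          simp only [specPasses, hflt]
          rfl
      simp [fAlt3Loop, hae, hz]
    · -- the minimum count k among the active characters
      have hne : alive.map (fun c => counts.getD c 0) ≠ [] := by
        simp [List.isEmpty_iff] at hae; simpa using hae
      obtain ⟨k, hk⟩ : ∃ k, PySem.List.min? (alive.map (fun c => counts.getD c 0))
          (fun x => x) = some k := by
        cases hm : PySem.List.min? (alive.map (fun c => counts.getD c 0)) (fun x => x) with
        | none => exact absurd ((PySem.List.min?_eq_none_iff _ _).mp hm) hne
        | some k => exact ⟨k, rfl⟩
      obtain ⟨c0, hc0al, hc0⟩ : ∃ c0 ∈ alive, counts.getD c0 0 = k := by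
        have := PySem.List.min?_mem hk
        obtain ⟨c0, hc0, he⟩ := List.mem_map.mp this
        exact ⟨c0, hc0, he⟩
      have hmin : ∀ c ∈ alive, k ≤ counts.getD c 0 := by
        intro c hc
        exact PySem.List.min?_isMin hk _ (List.mem_map.mpr ⟨c, hc, rfl⟩)
      have htk : t < k := by
        rw [← hc0]
        have := (List.mem_filter.mp (hal ▸ hc0al)).2
        simpa using this
      have hc0sl : c0 ∈ sl := (List.mem_filter.mp (hal ▸ hc0al)).1
      set r := (k - t).toNat with hr
      have hrk : (r : Int) = k - t := by omega
      have hrF : r ≤ F := by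
        have h5 : counts.getD c0 0 - t ≤ (F : Int) := hF c0 hc0sl
        omega
      have hrun := spec_run (fun c => counts.getD c 0) sl alive hae r t F hrF hal
        (by intro c hc
            show t + (r : Int) ≤ counts.getD c 0
            have := hmin c hc
            omega)
      -- B's one iteration
      have hstep : fAlt3Loop counts (n + 1) alive t out
          = fAlt3Loop counts n (alive.filter (fun c => decide (k < counts.getD c 0))) k
              ((out ++ (List.replicate (PySem.Int.floordiv (k - t) 2).toNat
                  (if PySem.Int.mod t 2 = 0 then alive ++ alive.reverse
                   else alive.reverse ++ alive)).flatten)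
               ++ (if PySem.Int.mod (k - t) 2 ≠ 0 then
                     (if PySem.Int.mod t 2 = 0 then alive else alive.reverse) else [])) := by
        simp only [fAlt3Loop, hae, Bool.false_eq_true, if_false, hk, Option.getD_some]
        by_cases hodd : PySem.Int.mod (k - t) 2 ≠ 0
        · rw [if_pos hodd, if_pos hodd]
        · rw [if_neg hodd, if_neg hodd]
          simp
      -- translate the Int arithmetic to the Nat form of emit_closed
      have hfd : (PySem.Int.floordiv (k - t) 2).toNat = r / 2 := by
        rw [PySem.Int.floordiv_eq_ediv_of_pos (by norm_num)]
        omega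
      have hm2 : PySem.Int.mod t 2 = t % 2 := PySem.Int.mod_eq_emod_of_pos (by norm_num)
      have hemit : (out ++ (List.replicate (PySem.Int.floordiv (k - t) 2).toNat
              (if PySem.Int.mod t 2 = 0 then alive ++ alive.reverse
               else alive.reverse ++ alive)).flatten)
           ++ (if PySem.Int.mod (k - t) 2 ≠ 0 then
                 (if PySem.Int.mod t 2 = 0 then alive else alive.reverse) else [])
          = out ++ specEmit alive r t := by
        rw [← emit_closed alive r t, hfd, hm2]
        by_cases hodd : r % 2 = 0
        · have h6 : PySem.Int.mod (k - t) 2 = 0 := by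
            rw [PySem.Int.mod_eq_emod_of_pos (by norm_num)]
            omega
          rw [if_neg (not_not_intro h6), if_neg (not_not_intro hodd)]
          simp
        · have h6 : PySem.Int.mod (k - t) 2 ≠ 0 := by
            rw [PySem.Int.mod_eq_emod_of_pos (by norm_num)]
            omega
          rw [if_pos h6, if_pos hodd]
          simp
      -- invariants for the next iteration
      have hal' : alive.filter (fun c => decide (k < counts.getD c 0))
          = sl.filter (fun c => decide (k < counts.getD c 0)) := by
        rw [hal, List.filter_filter]
        apply List.filter_congr
        intro c _
        by_cases h1 : k < counts.getD c 0
        · have h2 : t < counts.getD c 0 := by omega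
          simp [h1, h2]
        · simp [h1]
      have hlen' : (alive.filter (fun c => decide (k < counts.getD c 0))).length < n := by
        have hlt : (alive.filter (fun c => decide (k < counts.getD c 0))).length
            < alive.length :=
          filter_length_lt alive _ c0 hc0al (by simp [hc0])
        omega
      have hF' : ∀ c ∈ sl, counts.getD c 0 - k ≤ (F - r : Nat) := by
        intro c hc
        have h1 := hF c hc
        have h2 : (r : Int) ≤ F := by
          have := hF c0 hc0sl
          omega
        omega
      rw [hstep, hemit,
        ih (alive.filter (fun c => decide (k < counts.getD c 0))) k
          (out ++ specEmit alive r t) (F - r) hal' hlen' hF', hrun]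
      have h7 : t + (r : Int) = k := by omega
      rw [h7]
      simp [List.append_assoc]

-- A's counting loop equals B's: on a missing key d[i]=1 and d[i]=d.get(i,0)+1 insert the same entry
theorem fCount_eq (l : List Char) :
    fCount l = l.foldl (fun d c => d.insert c (d.getD c 0 + 1)) PySem.Dict.empty := by
  rw [fCount]
  congr 1
  funext d i
  by_cases h : d.contains i = true
  · simp [h]
  · have h' : d.contains i = false := by simpa using h
    rw [if_pos (by simp [h']), PySem.Dict.getD_of_not_contains d (0 : Int) h']
    norm_num

-- ===== VERDICT (by name: the statement is the Claim_ definition above) =====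
theorem f_spec : Claim_equal_f := by
  intro s _
  unfold Spec_f
  simp only [f, f_alt]
  rw [fCount_eq, PySem.Dict.foldl_insert_getD_add_one_eq_counter]
  set l := s.toList with hl
  set d0 := PySem.Dict.counter l with hd0
  have hkeys : d0.keys = PySem.Set.ofList l := PySem.Dict.keys_counter l
  rw [hkeys]
  set sl := PySem.List.sorted (PySem.Set.ofList l) (fun x => x) false with hsl
  have hnd : sl.Nodup :=
    ((PySem.List.sorted_perm (PySem.Set.ofList l) (fun x => x) false).nodup_iff).mpr
      (PySem.Set.nodup_ofList l)
  have hmem : ∀ c, c ∈ sl ↔ c ∈ PySem.Set.ofList l := fun c =>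
    PySem.List.mem_sorted (PySem.Set.ofList l) (fun x => x) false c
  have hcnt : ∀ c, d0.getD c 0 = (l.count c : Int) := fun c => PySem.Dict.getD_counter l c
  have hcpos : ∀ c, c ∈ sl → 0 < d0.getD c 0 := by
    intro c hc
    rw [hcnt c]
    exact_mod_cast List.count_pos_iff.mpr ((PySem.Set.mem_ofList l c).mp ((hmem c).mp hc))
  -- A side
  have hinv0 : ∀ c, d0.get? c = if c ∈ sl ∧ (0 : Int) < d0.getD c 0
      then some (d0.getD c 0 - 0) else none := by
    intro c
    by_cases hc : c ∈ sl
    · have hcont : d0.contains c = true := by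
        rw [PySem.Dict.contains_iff_mem_keys, hkeys]
        exact (hmem c).mp hc
      rw [get?_of_contains d0 c hcont, if_pos ⟨hc, hcpos c hc⟩, sub_zero]
    · have hcont : d0.contains c = false := by
        have : ¬ d0.contains c = true := by
          rw [PySem.Dict.contains_iff_mem_keys, hkeys]
          exact fun h => hc ((hmem c).mpr h)
        simpa using this
      rw [get?_of_not_contains d0 c hcont, if_neg (by tauto)]
  have hA := A_loop_spec (fun c => d0.getD c 0) sl hnd (l.length + 1) d0 0 [] (by norm_num)
    hinv0
  -- B side
  have halive0 : sl = sl.filter (fun c => decide ((0 : Int) < d0.getD c 0)) := by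
    symm
    rw [List.filter_eq_self]
    intro c hc
    simpa using hcpos c hc
  have hlen0 : sl.length < l.length + 1 := by
    have h1 : sl.length = (PySem.Set.ofList l).length :=
      (PySem.List.sorted_perm (PySem.Set.ofList l) (fun x => x) false).length_eq
    have h2 := PySem.Set.length_ofList_le l
    omega
  have hF0 : ∀ c ∈ sl, d0.getD c 0 - 0 ≤ ((2 * (l.length + 1) : Nat) : Int) := by
    intro c _
    rw [hcnt c, sub_zero]
    have := List.count_le_length (l := l) (a := c)
    push_cast
    omega
  have hB := B_loop_spec d0 sl (l.length + 1) sl 0 [] (2 * (l.length + 1)) halive0 hlen0 hF0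
  rw [hA, hB]
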